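-- pv_equiv track=rewrite | github.com/antonvibeart/Next-Generation-AI.-NEXUS-TwinLoop-A-Dual-Loop-Framework-for-Continuous-Learning | nexus_twinloop_demo_2.py | poison_filter
-- ===== SOURCE A (Python) =====
-- from typing import Dict, List, Optional, Tuple, Any, Callable, Literal, Set
--
-- def poison_filter(samples: List[Dict[str, Any]],
--                  banned_tokens: Set[str] = None) -> List[Dict[str, Any]]:
--     """Filter potentially poisoned samples."""
--     if banned_tokens is None:
--         banned_tokens = {'malware', 'exploit', 'hack', 'crack', 'backdoor'}
--
--     filtered = []
--     for s in samples:
--         text = (s.get('input', '') + ' ' + s.get('label', '')).lower()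
--         if not any(token in text for token in banned_tokens):
--             filtered.append(s)
--     return filtered
-- ===== SOURCE B (Python) =====
-- def poison_filter(samples, banned_tokens=None):
--     """Filter potentially poisoned samples (token-outer sieve over precomputed texts)."""
--     if banned_tokens is None:
--         banned_tokens = {'malware', 'exploit', 'hack', 'crack', 'backdoor'}
--     pairs = [(s, (s.get('input', '') + ' ' + s.get('label', '')).lower()) for s in samples]
--     for token in banned_tokens:
--         pairs = [(s, t) for (s, t) in pairs if token not in t]
--     return [s for (s, t) in pairs]
-- ===== Notes on version B (the rewrite author's own statement) =====
-- stated objective: alternative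
-- what changed: B inverts the loop nesting: it precomputes each sample's lowered text once, then sieves the (sample, text) list token by token (one filtering pass per banned token), instead of A's per-sample any()-scan over all tokens; order-preserving filtering makes the results identical.
import Mathlib
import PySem

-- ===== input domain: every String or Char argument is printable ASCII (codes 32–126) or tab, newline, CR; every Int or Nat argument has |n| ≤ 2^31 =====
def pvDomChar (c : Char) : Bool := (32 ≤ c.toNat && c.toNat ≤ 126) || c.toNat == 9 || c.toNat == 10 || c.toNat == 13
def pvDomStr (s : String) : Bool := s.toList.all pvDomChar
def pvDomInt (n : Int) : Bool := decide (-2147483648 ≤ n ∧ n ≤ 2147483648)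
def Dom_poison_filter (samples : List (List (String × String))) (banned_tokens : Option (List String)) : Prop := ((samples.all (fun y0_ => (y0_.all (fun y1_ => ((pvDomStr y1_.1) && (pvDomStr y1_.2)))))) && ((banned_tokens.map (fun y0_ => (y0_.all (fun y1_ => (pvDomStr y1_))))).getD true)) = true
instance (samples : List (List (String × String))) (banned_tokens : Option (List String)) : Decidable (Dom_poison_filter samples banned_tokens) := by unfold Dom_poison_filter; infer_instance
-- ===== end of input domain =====

-- B replaces A's per-sample any()-scan over all tokens by a token-outer sieve over
-- precomputed (sample, lowered-text) pairs; same cost, alternative structure.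


-- shared text expression: (s.get('input','') + ' ' + s.get('label','')).lower()
def pfText (s : List (String × String)) : String :=
  PySem.Str.lower (PySem.Dict.getD ⟨s⟩ "input" "" ++ " " ++ PySem.Dict.getD ⟨s⟩ "label" "")

def pfDefault : List String := ["malware", "exploit", "hack", "crack", "backdoor"]

-- ===== PORT A =====
def poison_filter (samples : List (List (String × String))) (banned_tokens : Option (List String)) : List (List (String × String)) :=
  let tokens := match banned_tokens with
    | none => pfDefault
    | some t => t
  samples.foldl (fun filtered s =>
    if tokens.any (fun token => PySem.Str.isIn token (pfText s)) then filtered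
    else filtered ++ [s]) []

-- ===== PORT B =====
def poison_filter_alt (samples : List (List (String × String))) (banned_tokens : Option (List String)) : List (List (String × String)) :=
  let tokens := match banned_tokens with
    | none => pfDefault
    | some t => t
  let pairs := samples.map (fun s => (s, pfText s))
  let final := tokens.foldl (fun ps token => ps.filter (fun p => !(PySem.Str.isIn token p.2))) pairs
  final.map (·.1)

-- ===== PRECONDITION & SPEC =====
def Spec_poison_filter (samples : List (List (String × String))) (banned_tokens : Option (List String)) (out : List (List (String × String))) : Prop := out = poison_filter_alt samples banned_tokens
instance (samples : List (List (String × String))) (banned_tokens : Option (List String)) (out : List (List (String × String))) : Decidable (Spec_poison_filter samples banned_tokens out) := by unfold Spec_poison_filter; infer_instance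

-- ===== CLAIM (what is proved, stated in full; the proofs are below) =====
def Claim_equal_poison_filter : Prop := ∀ (samples : List (List (String × String))) (banned_tokens : Option (List String)), Dom_poison_filter samples banned_tokens → Spec_poison_filter samples banned_tokens (poison_filter samples banned_tokens)

-- ===== LEMMAS AND PROOFS =====

-- A's append loop is a filter of the kept elements
theorem pf_foldl_A {α : Type} (p : α → Bool) (xs : List α) (acc : List α) :
    xs.foldl (fun f s => if p s then f else f ++ [s]) acc = acc ++ xs.filter (fun s => !p s) := by
  induction xs generalizing acc with
  | nil => simp
  | cons x xs ih => by_cases h : p x <;> simp [h, ih]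

-- a sequence of filters is one filter with the conjunction of the tests
theorem pf_foldl_filter {α β : Type} (q : β → α → Bool) (ts : List β) (ps : List α) :
    ts.foldl (fun acc t => acc.filter (fun p => !(q t p))) ps
      = ps.filter (fun p => !(ts.any (fun t => q t p))) := by
  induction ts generalizing ps with
  | nil => simp
  | cons t ts ih =>
    simp only [List.foldl_cons, ih, List.filter_filter, List.any_cons]
    congr 1
    funext p
    cases q t p <;> simp

theorem pf_map_fst_filter_snd (tokens : List String) (xs : List (List (String × String))) :
    ((xs.map (fun s => (s, pfText s))).filter
        (fun p => !(tokens.any (fun t => PySem.Str.isIn t p.2)))).map (·.1)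
      = xs.filter (fun s => !(tokens.any (fun t => PySem.Str.isIn t (pfText s)))) := by
  induction xs with
  | nil => rfl
  | cons x xs ih =>
    by_cases h : (tokens.any (fun t => PySem.Str.isIn t (pfText x))) = true
    · simp only [List.map_cons, List.filter_cons, h, Bool.not_true, Bool.false_eq_true, if_false]
      exact ih
    · rw [Bool.not_eq_true] at h
      simp only [List.map_cons, List.filter_cons, h, Bool.not_false, if_true, List.map_cons]
      rw [ih]

-- ===== VERDICT (by name: the statement is the Claim_ definition above) =====
theorem poison_filter_spec : Claim_equal_poison_filter := by
  intro samples banned_tokens _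
  unfold Spec_poison_filter poison_filter poison_filter_alt
  cases banned_tokens <;>
    simp only [pf_foldl_A, List.nil_append, pf_foldl_filter, pf_map_fst_filter_snd]
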